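-- pv_equiv track=rewrite | github.com/posl/comment_recommendation | script/mod_gen/4_time/zh/272_C/0.py | check_even_sum
-- ===== SOURCE A (Python) =====
-- def check_even_sum(A):
--     A = sorted(A)
--     max_even = -1
--     for i in range(len(A)):
--         for j in range(i+1, len(A)):
--             if (A[i] + A[j]) % 2 == 0:
--                 max_even = max(max_even, A[i] + A[j])
--     return max_even
-- ===== SOURCE B (Python) =====
-- def check_even_sum(A):
--     # An even pair sum is even+even or odd+odd, so only the two largest of
--     # each parity class can matter: split by parity, sort each class once,
--     # add its top two.  O(n log n) instead of A's O(n^2) pair scan.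
--     best = -1
--     for xs in ([x for x in A if x % 2 == 0], [x for x in A if x % 2 != 0]):
--         if len(xs) >= 2:
--             xs = sorted(xs)
--             best = max(best, xs[-1] + xs[-2])
--     return best
-- ===== Notes on version B (the rewrite author's own statement) =====
-- stated objective: faster
-- what changed: Replaced the quadratic scan over all pairs by splitting the list into parity classes and summing the two largest elements of each class (an even pair sum must come from one class), keeping the -1 initial value.
import Mathlib
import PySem

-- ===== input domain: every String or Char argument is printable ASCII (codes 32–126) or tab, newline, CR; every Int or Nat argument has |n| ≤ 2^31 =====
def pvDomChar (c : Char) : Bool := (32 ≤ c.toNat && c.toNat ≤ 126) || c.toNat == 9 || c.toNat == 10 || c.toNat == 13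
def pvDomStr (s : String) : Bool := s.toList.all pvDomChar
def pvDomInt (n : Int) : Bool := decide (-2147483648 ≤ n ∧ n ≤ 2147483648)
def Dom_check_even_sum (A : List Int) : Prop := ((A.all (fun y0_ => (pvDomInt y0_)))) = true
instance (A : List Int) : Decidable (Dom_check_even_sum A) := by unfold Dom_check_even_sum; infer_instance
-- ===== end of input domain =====

-- B replaces A's quadratic scan over all pairs by splitting into parity classes and
-- summing the two largest elements of each class (objective: faster).

-- ===== PORT A =====
def check_even_sum (A : List Int) : Int :=
  let L := PySem.List.sorted A (fun x => x)
  (PySem.List.pyRange 0 (PySem.List.len L)).foldl (fun m i =>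
    (PySem.List.pyRange (i + 1) (PySem.List.len L)).foldl (fun m j =>
      if PySem.Int.mod (PySem.List.pyGetD L i 0 + PySem.List.pyGetD L j 0) 2 = 0
      then max m (PySem.List.pyGetD L i 0 + PySem.List.pyGetD L j 0) else m) m) (-1)

-- ===== PORT B =====
def check_even_sum_alt (A : List Int) : Int :=
  [A.filter (fun x => PySem.Int.mod x 2 == 0),
   A.filter (fun x => !(PySem.Int.mod x 2 == 0))].foldl (fun best xs =>
      if 2 ≤ xs.length then
        let s := PySem.List.sorted xs (fun x => x)
        max best (PySem.List.pyGetD s (-1) 0 + PySem.List.pyGetD s (-2) 0)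
      else best) (-1)

-- ===== PRECONDITION & SPEC =====
def Spec_check_even_sum (A : List Int) (out : Int) : Prop := out = check_even_sum_alt A
instance (A : List Int) (out : Int) : Decidable (Spec_check_even_sum A out) := by unfold Spec_check_even_sum; infer_instance

-- ===== CLAIM (what is proved, stated in full; the proofs are below) =====
def Claim_equal_check_even_sum : Prop := ∀ (A : List Int), Dom_check_even_sum A → Spec_check_even_sum A (check_even_sum A)

-- ===== LEMMAS AND PROOFS =====

-- one step of A's inner loop
def pvStep (m x y : Int) : Int := if PySem.Int.mod (x + y) 2 = 0 then max m (x + y) else m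

-- A's nested index loops, restated structurally
def pvPairFold : List Int → Int → Int
  | [], m => m
  | x :: xs, m => pvPairFold xs (xs.foldl (fun m y => pvStep m x y) m)

-- the even pair sums of a list, front pairings first
def pvEvenPairs : List Int → List Int
  | [] => []
  | x :: xs => ((xs.filter (fun y => PySem.Int.mod (x + y) 2 == 0)).map (fun y => x + y)) ++ pvEvenPairs xs

-- all pair sums
def pvPairs : List Int → List Int
  | [] => []
  | x :: xs => (xs.map (fun y => x + y)) ++ pvPairs xs

lemma pvMod2 (a : Int) : PySem.Int.mod a 2 = a % 2 :=
  PySem.Int.mod_eq_emod_of_pos (by norm_num)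

lemma pvOuter (L : List Int) : ∀ (fuel k : Nat) (m : Int), L.length ≤ k + fuel →
    (PySem.List.pyRange (k : Int) (PySem.List.len L)).foldl (fun m i =>
      (PySem.List.pyRange (i + 1) (PySem.List.len L)).foldl (fun m j =>
        pvStep m (PySem.List.pyGetD L i 0) (PySem.List.pyGetD L j 0)) m) m
    = pvPairFold (L.drop k) m := by
  intro fuel
  induction fuel with
  | zero =>
    intro k m h
    have hk : L.length ≤ k := by omega
    rw [PySem.List.pyRange_one_eq_nil (by simp [PySem.List.len]; exact_mod_cast hk)]
    rw [List.drop_of_length_le hk]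
    rfl
  | succ fuel ih =>
    intro k m h
    by_cases hk : k < L.length
    · rw [PySem.List.pyRange_one_cons (show (k : Int) < PySem.List.len L by
        simp [PySem.List.len]; exact_mod_cast hk)]
      rw [List.foldl_cons]
      have hget : PySem.List.pyGetD L (k : Int) 0 = L[k] := by
        rw [PySem.List.pyGetD_natCast, List.getD_eq_getElem _ _ hk]
      have hinner : (PySem.List.pyRange ((k : Int) + 1) (PySem.List.len L)).foldl
          (fun m j => pvStep m (PySem.List.pyGetD L (k : Int) 0) (PySem.List.pyGetD L j 0)) m
          = (L.drop (k + 1)).foldl (fun m y => pvStep m (L[k]'hk) y) m := by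
        have hcast : ((k : Int) + 1).toNat = k + 1 := by omega
        have := PySem.List.foldl_pyRange_pyGetD L 0 (fun m y => pvStep m (L[k]'hk) y) m
          (a := (k : Int) + 1) (by omega)
        rw [hcast] at this
        rw [← this]
        simp only [hget]
      rw [hinner]
      have hcast2 : (k : Int) + 1 = ((k + 1 : Nat) : Int) := by push_cast; ring
      rw [hcast2, ih (k + 1) _ (by omega)]
      rw [List.drop_eq_getElem_cons hk]
      rfl
    · have hk' : L.length ≤ k := by omega
      rw [PySem.List.pyRange_one_eq_nil (by simp [PySem.List.len]; exact_mod_cast hk')]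
      rw [List.drop_of_length_le hk']
      rfl

lemma pvInner (x : Int) (xs : List Int) : ∀ m : Int,
    xs.foldl (fun m y => pvStep m x y) m
    = ((xs.filter (fun y => PySem.Int.mod (x + y) 2 == 0)).map (fun y => x + y)).foldl max m := by
  induction xs with
  | nil => intro m; simp
  | cons y ys ih =>
    intro m
    rw [List.foldl_cons, List.filter_cons]
    by_cases h : PySem.Int.mod (x + y) 2 = 0
    · rw [if_pos (by simp only [beq_iff_eq]; exact h), List.map_cons, List.foldl_cons, ih]
      congr 1
      simp only [pvStep, if_pos h]
    · rw [if_neg (by simp only [beq_iff_eq]; exact h), ih]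
      congr 1
      simp only [pvStep, if_neg h]

lemma pvPairFold_eq (L : List Int) : ∀ m : Int, pvPairFold L m = (pvEvenPairs L).foldl max m := by
  induction L with
  | nil => intro m; rfl
  | cons x xs ih =>
    intro m
    simp only [pvPairFold, pvEvenPairs, List.foldl_append]
    rw [ih, pvInner]

lemma pvSplit (L : List Int) :
    (pvEvenPairs L).Perm
      (pvEvenPairs (L.filter (fun x => PySem.Int.mod x 2 == 0)) ++
       pvEvenPairs (L.filter (fun x => !(PySem.Int.mod x 2 == 0)))) := by
  induction L with
  | nil => simp [pvEvenPairs]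
  | cons x xs ih =>
    by_cases he : PySem.Int.mod x 2 = 0
    · have hx : x % 2 = 0 := by rw [← pvMod2]; exact he
      have hf1 : (x :: xs).filter (fun x => PySem.Int.mod x 2 == 0)
          = x :: xs.filter (fun x => PySem.Int.mod x 2 == 0) := by
        rw [List.filter_cons, if_pos (by simp only [beq_iff_eq]; exact he)]
      have hf2 : (x :: xs).filter (fun x => !(PySem.Int.mod x 2 == 0))
          = xs.filter (fun x => !(PySem.Int.mod x 2 == 0)) := by
        rw [List.filter_cons,
          if_neg (by simp only [Bool.not_eq_true', beq_eq_false_iff_ne, ne_eq, not_not]; exact he)]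
      have hcong : xs.filter (fun y => PySem.Int.mod (x + y) 2 == 0)
          = xs.filter (fun y => PySem.Int.mod y 2 == 0) := by
        apply List.filter_congr
        intro y _
        rw [Bool.eq_iff_iff]
        simp only [beq_iff_eq, pvMod2]
        omega
      have hall : (xs.filter (fun y => PySem.Int.mod y 2 == 0)).filter
          (fun y => PySem.Int.mod (x + y) 2 == 0) = xs.filter (fun y => PySem.Int.mod y 2 == 0) := by
        apply List.filter_eq_self.mpr
        intro y hy
        have hy2 : y % 2 = 0 := by
          have h' := (List.mem_filter.1 hy).2
          simp only [beq_iff_eq] at h'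
          rw [← pvMod2]; exact h'
        simp only [beq_iff_eq, pvMod2]
        omega
      rw [pvEvenPairs, hf1, hf2, hcong]
      rw [show pvEvenPairs (x :: xs.filter (fun x => PySem.Int.mod x 2 == 0))
          = ((xs.filter (fun y => PySem.Int.mod y 2 == 0)).filter
              (fun y => PySem.Int.mod (x + y) 2 == 0)).map (fun y => x + y)
            ++ pvEvenPairs (xs.filter (fun x => PySem.Int.mod x 2 == 0)) from rfl, hall]
      have := ih.append_left ((xs.filter (fun y => PySem.Int.mod y 2 == 0)).map (fun y => x + y))
      simpa [List.append_assoc] using this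
    · have hx : x % 2 = 1 := by
        rcases PySem.Int.mod_two_eq x with h0 | h1
        · exact absurd h0 he
        · rw [← pvMod2]; exact h1
      have hf1 : (x :: xs).filter (fun x => PySem.Int.mod x 2 == 0)
          = xs.filter (fun x => PySem.Int.mod x 2 == 0) := by
        rw [List.filter_cons, if_neg (by simp only [beq_iff_eq]; exact he)]
      have hf2 : (x :: xs).filter (fun x => !(PySem.Int.mod x 2 == 0))
          = x :: xs.filter (fun x => !(PySem.Int.mod x 2 == 0)) := by
        rw [List.filter_cons,
          if_pos (by simp only [Bool.not_eq_true', beq_eq_false_iff_ne, ne_eq]; exact he)]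
      have hcong : xs.filter (fun y => PySem.Int.mod (x + y) 2 == 0)
          = xs.filter (fun y => !(PySem.Int.mod y 2 == 0)) := by
        apply List.filter_congr
        intro y _
        rw [Bool.eq_iff_iff]
        simp only [beq_iff_eq, Bool.not_eq_true', beq_eq_false_iff_ne, ne_eq, pvMod2]
        omega
      have hall : (xs.filter (fun y => !(PySem.Int.mod y 2 == 0))).filter
          (fun y => PySem.Int.mod (x + y) 2 == 0)
          = xs.filter (fun y => !(PySem.Int.mod y 2 == 0)) := by
        apply List.filter_eq_self.mpr
        intro y hy
        have hy2 : ¬ y % 2 = 0 := by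
          have h' := (List.mem_filter.1 hy).2
          simp only [Bool.not_eq_true', beq_eq_false_iff_ne, ne_eq] at h'
          rw [← pvMod2]; exact h'
        simp only [beq_iff_eq, pvMod2]
        omega
      rw [pvEvenPairs, hf1, hf2, hcong]
      rw [show pvEvenPairs (x :: xs.filter (fun x => !(PySem.Int.mod x 2 == 0)))
          = ((xs.filter (fun y => !(PySem.Int.mod y 2 == 0))).filter
              (fun y => PySem.Int.mod (x + y) 2 == 0)).map (fun y => x + y)
            ++ pvEvenPairs (xs.filter (fun x => !(PySem.Int.mod x 2 == 0))) from rfl, hall]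
      refine (ih.append_left _).trans ?_
      refine (List.Perm.of_eq (List.append_assoc _ _ _).symm).trans ?_
      refine ((List.perm_append_comm.append_right _).trans ?_)
      exact List.Perm.of_eq (List.append_assoc _ _ _)

lemma pvEvenPairs_const (r : Int) (xs : List Int) (h : ∀ y ∈ xs, PySem.Int.mod y 2 = r) :
    pvEvenPairs xs = pvPairs xs := by
  induction xs with
  | nil => rfl
  | cons x t ih =>
    have hmx : PySem.Int.mod x 2 = r := h x (by simp)
    have hx : x % 2 = r := by rw [← pvMod2]; exact hmx
    have hr : r = 0 ∨ r = 1 := by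
      rcases PySem.Int.mod_two_eq x with h0 | h1
      · left; rw [← hmx]; exact h0
      · right; rw [← hmx]; exact h1
    have hall : t.filter (fun y => PySem.Int.mod (x + y) 2 == 0) = t := by
      apply List.filter_eq_self.mpr
      intro y hy
      have hy2 : y % 2 = r := by rw [← pvMod2]; exact h y (by simp [hy])
      simp only [beq_iff_eq, pvMod2]
      omega
    rw [pvEvenPairs, pvPairs, hall, ih (fun y hy => h y (by simp [hy]))]

lemma pvPairs_mem (xs : List Int) (a : Int) :
    a ∈ pvPairs xs ↔ ∃ i j, ∃ (hij : i < j) (hj : j < xs.length), a = xs[i]'(by omega) + xs[j] := by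
  induction xs with
  | nil => simp [pvPairs]
  | cons x t ih =>
    simp only [pvPairs, List.mem_append, List.mem_map, ih]
    constructor
    · rintro (⟨y, hy, rfl⟩ | ⟨i, j, hij, hj, rfl⟩)
      · obtain ⟨n, hn, rfl⟩ := List.mem_iff_getElem.1 hy
        exact ⟨0, n + 1, by omega, by simpa using Nat.succ_lt_succ hn, by simp⟩
      · exact ⟨i + 1, j + 1, by omega, by simpa using Nat.succ_lt_succ hj, by simp⟩
    · rintro ⟨i, j, hij, hj, rfl⟩
      match i, j, hij, hj with
      | 0, jj + 1, _, hj =>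
        left
        exact ⟨t[jj]'(by simpa using hj), List.getElem_mem _, by simp⟩
      | ii + 1, jj + 1, hij, hj =>
        right
        exact ⟨ii, jj, by omega, by simpa using hj, by simp⟩

lemma pvMono (s : List Int) (hs : List.Pairwise (· ≤ ·) s) {i j : Nat} (hij : i ≤ j)
    (hj : j < s.length) : s[i]'(by omega) ≤ s[j] := by
  rcases Nat.lt_or_ge i j with h | h
  · exact List.pairwise_iff_getElem.1 hs i j (by omega) hj h
  · have : i = j := by omega
    subst this; rfl

lemma pvFoldlMax_le (l : List Int) : ∀ (m c : Int), m ≤ c → (∀ a ∈ l, a ≤ c) →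
    l.foldl max m ≤ c := by
  induction l with
  | nil => intro m c h _; simpa using h
  | cons x xs ih =>
    intro m c h hall
    simp only [List.foldl_cons]
    exact ih _ c (max_le h (hall x (by simp))) (fun a ha => hall a (by simp [ha]))

lemma pvFoldlMax_char (l : List Int) (k : Int) (hk : k ∈ l) (hb : ∀ a ∈ l, a ≤ k) (m : Int) :
    l.foldl max m = max m k := by
  refine le_antisymm ?_ ?_
  · exact pvFoldlMax_le l m (max m k) (le_max_left _ _)
      (fun a ha => le_trans (hb a ha) (le_max_right _ _))
  · exact max_le (PySem.List.le_foldl_max l m).1 ((PySem.List.le_foldl_max l m).2 k hk)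

lemma pvClass (s : List Int) (hs : List.Pairwise (· ≤ ·) s) (m : Int) :
    (pvPairs s).foldl max m =
      if 2 ≤ s.length then max m (s.getD (s.length - 2) 0 + s.getD (s.length - 1) 0) else m := by
  by_cases h2 : 2 ≤ s.length
  · rw [if_pos h2]
    have hl2 : s.length - 2 < s.length := by omega
    have hl1 : s.length - 1 < s.length := by omega
    have hmem : s[s.length - 2]'hl2 + s[s.length - 1]'hl1 ∈ pvPairs s :=
      (pvPairs_mem s _).2 ⟨s.length - 2, s.length - 1, by omega, hl1, rfl⟩
    have hb : ∀ a ∈ pvPairs s, a ≤ s[s.length - 2]'hl2 + s[s.length - 1]'hl1 := by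
      intro a ha
      obtain ⟨i, j, hij, hj, rfl⟩ := (pvPairs_mem s a).1 ha
      have hi1 : s[i]'(by omega) ≤ s[s.length - 2]'hl2 := pvMono s hs (by omega) hl2
      have hj1 : s[j]'hj ≤ s[s.length - 1]'hl1 := pvMono s hs (by omega) hl1
      omega
    rw [pvFoldlMax_char _ _ hmem hb m]
    rw [List.getD_eq_getElem _ _ hl2, List.getD_eq_getElem _ _ hl1]
  · rw [if_neg h2]
    rcases s with _ | ⟨a, _ | ⟨b, t⟩⟩
    · rfl
    · rfl
    · exfalso; simp at h2

lemma pvNeg1 (s : List Int) (h : 1 ≤ s.length) :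
    PySem.List.pyGetD s (-1) 0 = s.getD (s.length - 1) 0 := by
  simp only [PySem.List.pyGetD, PySem.List.pyGet?, PySem.List.pyIdx?]
  rw [if_neg (by omega), if_pos (by omega)]
  have h1 : (-(-1 : Int)).toNat = 1 := by decide
  rw [h1, Option.bind_some, List.getD_eq_getElem?_getD]

lemma pvNeg2 (s : List Int) (h : 2 ≤ s.length) :
    PySem.List.pyGetD s (-2) 0 = s.getD (s.length - 2) 0 := by
  simp only [PySem.List.pyGetD, PySem.List.pyGet?, PySem.List.pyIdx?]
  rw [if_neg (by omega), if_pos (by omega)]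
  have h1 : (-(-2 : Int)).toNat = 2 := by decide
  rw [h1, Option.bind_some, List.getD_eq_getElem?_getD]

lemma pvSortedFilter (A : List Int) (p : Int → Bool) :
    PySem.List.sorted (A.filter p) (fun x => x)
      = (PySem.List.sorted A (fun x => x)).filter p := by
  have hperm : (PySem.List.sorted (A.filter p) (fun x => x)).Perm
      ((PySem.List.sorted A (fun x => x)).filter p) :=
    (PySem.List.sorted_perm _ _ false).trans
      (((PySem.List.sorted_perm A _ false).symm).filter p)
  have s1 : List.Pairwise (· ≤ ·) (PySem.List.sorted (A.filter p) (fun x => x)) := by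
    simpa using PySem.List.sorted_pairwise (A.filter p) (fun x => x)
  have s2 : List.Pairwise (· ≤ ·) ((PySem.List.sorted A (fun x => x)).filter p) := by
    exact (by simpa using PySem.List.sorted_pairwise A (fun x => x) : List.Pairwise (· ≤ ·) _).filter p
  exact List.eq_of_perm_of_sorted (fun a b _ _ hab hba => le_antisymm hab hba) s1 s2 hperm

-- ===== VERDICT (by name: the statement is the Claim_ definition above) =====
theorem check_even_sum_spec : Claim_equal_check_even_sum := by
  intro A _
  unfold Spec_check_even_sum check_even_sum check_even_sum_alt
  simp only [List.foldl_cons, List.foldl_nil]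
  set L := PySem.List.sorted A (fun x => x) with hL
  have hLpw : List.Pairwise (· ≤ ·) L := by simpa using PySem.List.sorted_pairwise A (fun x => x)
  set E := L.filter (fun x => PySem.Int.mod x 2 == 0) with hEdef
  set O := L.filter (fun x => !(PySem.Int.mod x 2 == 0)) with hOdef
  have hsortE : PySem.List.sorted (A.filter (fun x => PySem.Int.mod x 2 == 0)) (fun x => x) = E :=
    pvSortedFilter A _
  have hsortO : PySem.List.sorted (A.filter (fun x => !(PySem.Int.mod x 2 == 0))) (fun x => x) = O :=
    pvSortedFilter A _
  have hlenE : (A.filter (fun x => PySem.Int.mod x 2 == 0)).length = E.length := by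
    rw [← hsortE]
    exact ((PySem.List.sorted_perm (A.filter (fun x => PySem.Int.mod x 2 == 0))
      (fun x => x) false).length_eq).symm
  have hlenO : (A.filter (fun x => !(PySem.Int.mod x 2 == 0))).length = O.length := by
    rw [← hsortO]
    exact ((PySem.List.sorted_perm (A.filter (fun x => !(PySem.Int.mod x 2 == 0)))
      (fun x => x) false).length_eq).symm
  have hEpw : List.Pairwise (· ≤ ·) E := hLpw.filter _
  have hOpw : List.Pairwise (· ≤ ·) O := hLpw.filter _
  have hEmem : ∀ y ∈ E, PySem.Int.mod y 2 = 0 := by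
    intro y hy
    have h' := (List.mem_filter.1 hy).2
    simp only [beq_iff_eq] at h'
    exact h'
  have hOmem : ∀ y ∈ O, PySem.Int.mod y 2 = 1 := by
    intro y hy
    have h' := (List.mem_filter.1 hy).2
    simp only [Bool.not_eq_true', beq_eq_false_iff_ne, ne_eq] at h'
    rcases PySem.Int.mod_two_eq y with h0 | h1
    · exact absurd h0 h'
    · exact h1
  -- A side
  have h1 := pvOuter L L.length 0 (-1) (by omega)
  simp only [Nat.cast_zero, List.drop_zero, pvStep] at h1
  rw [h1, pvPairFold_eq, (pvSplit L).foldl_eq, List.foldl_append,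
    ← hEdef, ← hOdef, pvEvenPairs_const 0 E hEmem, pvEvenPairs_const 1 O hOmem,
    pvClass E hEpw, pvClass O hOpw]
  -- B side
  rw [hsortE, hsortO, hlenE, hlenO]
  by_cases hne : 2 ≤ E.length
  · by_cases hno : 2 ≤ O.length
    · rw [if_pos hne, if_pos hno, if_pos hne, if_pos hno,
        pvNeg1 E (by omega), pvNeg2 E hne, pvNeg1 O (by omega), pvNeg2 O hno,
        Int.add_comm (E.getD (E.length - 1) 0), Int.add_comm (O.getD (O.length - 1) 0)]
    · rw [if_pos hne, if_neg hno, if_pos hne, if_neg hno,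
        pvNeg1 E (by omega), pvNeg2 E hne, Int.add_comm (E.getD (E.length - 1) 0)]
  · by_cases hno : 2 ≤ O.length
    · rw [if_neg hne, if_pos hno, if_neg hne, if_pos hno,
        pvNeg1 O (by omega), pvNeg2 O hno, Int.add_comm (O.getD (O.length - 1) 0)]
    · rw [if_neg hne, if_neg hno, if_neg hne, if_neg hno]
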